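-- pv_equiv track=rewrite | github.com/iTsluku/segementation_text_to_json | special_court_munich/process_document.py | get_process_text_after_indices
-- ===== SOURCE A (Python) =====
-- def get_process_text_after_indices(text: str) -> str:
--     o = ""
--     k = 0
--     for c in text:
--         if k == 4:
--             o += c
--         elif k == 0 and c.isdigit():
--             k = 1
--         elif k == 1 and not c.isdigit():
--             k = 2
--         elif k == 2 and c.isdigit():
--             k = 3
--         elif k == 3 and not c.isdigit():
--             k = 4
--     return o.lstrip()
-- ===== SOURCE B (Python) =====
-- def get_process_text_after_indices(text: str) -> str:
--     # Four alternating run-skips (non-digit run, digit run, non-digit run, digit run),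
--     # then drop the single transition character and return the rest, left-stripped.
--     i = 0
--     n = len(text)
--     for want_digit in (False, True, False, True):
--         while i < n and text[i].isdigit() == want_digit:
--             i += 1
--     return text[i + 1:].lstrip()
-- ===== Notes on version B (the rewrite author's own statement) =====
-- stated objective: simpler
-- what changed: Replaces the 5-state accumulating state machine by four alternating run-skips (drop non-digit run, digit run, non-digit run, digit run), then dropping the one transition character and left-stripping the remaining suffix.
import Mathlib
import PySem

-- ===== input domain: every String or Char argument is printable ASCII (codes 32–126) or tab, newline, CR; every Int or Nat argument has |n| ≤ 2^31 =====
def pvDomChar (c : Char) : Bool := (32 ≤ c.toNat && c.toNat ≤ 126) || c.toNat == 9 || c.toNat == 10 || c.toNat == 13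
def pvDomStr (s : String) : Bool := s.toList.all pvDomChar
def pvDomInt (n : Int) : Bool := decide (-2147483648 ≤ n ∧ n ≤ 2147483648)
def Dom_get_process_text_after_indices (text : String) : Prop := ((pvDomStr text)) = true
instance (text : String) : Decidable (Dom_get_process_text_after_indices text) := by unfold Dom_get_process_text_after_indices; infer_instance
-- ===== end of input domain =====

-- B replaces A's 5-state accumulating state machine by four alternating index run-skips
-- followed by dropping one transition char and left-stripping: simpler decomposition.

-- ===== PORT A =====
-- one iteration of A's for-loop body on state (o, k)
def pvAStep (s : List Char × Int) (c : Char) : List Char × Int :=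
  if s.2 = 4 then (s.1 ++ [c], s.2)
  else if s.2 = 0 ∧ PySem.Chars.isdigit c then (s.1, 1)
  else if s.2 = 1 ∧ ¬ PySem.Chars.isdigit c then (s.1, 2)
  else if s.2 = 2 ∧ PySem.Chars.isdigit c then (s.1, 3)
  else if s.2 = 3 ∧ ¬ PySem.Chars.isdigit c then (s.1, 4)
  else s

def get_process_text_after_indices (text : String) : String :=
  let s := text.toList.foldl pvAStep ([], 0)
  String.ofList (PySem.Chars.lstrip s.1)

-- ===== PORT B =====
-- the inner while-loop: advance i while i < len and isdigit(text[i]) == w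
def pvBSkip (cs : List Char) (w : Bool) (i : Nat) : Nat :=
  if h : i < cs.length then
    if PySem.Chars.isdigit cs[i] = w then pvBSkip cs w (i + 1) else i
  else i
termination_by cs.length - i

def get_process_text_after_indices_alt (text : String) : String :=
  let cs := text.toList
  let i := [false, true, false, true].foldl (fun i w => pvBSkip cs w i) 0
  -- text[i + 1:] : from a nonnegative start, Python's slice-to-end is List.drop
  String.ofList (PySem.Chars.lstrip (cs.drop (i + 1)))

-- ===== PRECONDITION & SPEC =====
def Spec_get_process_text_after_indices (text : String) (out : String) : Prop := out = get_process_text_after_indices_alt text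
instance (text : String) (out : String) : Decidable (Spec_get_process_text_after_indices text out) := by unfold Spec_get_process_text_after_indices; infer_instance

-- ===== CLAIM (what is proved, stated in full; the proofs are below) =====
def Claim_equal_get_process_text_after_indices : Prop := ∀ (text : String), Dom_get_process_text_after_indices text → Spec_get_process_text_after_indices text (get_process_text_after_indices text)

-- ===== LEMMAS AND PROOFS =====

-- proof-side view of one run-skip on the remaining suffix
def pvBDrop (w : Bool) : List Char → List Char
  | [] => []
  | c :: cs => if PySem.Chars.isdigit c = w then pvBDrop w cs else c :: cs

theorem pvA_state4 (cs : List Char) (o : List Char) :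
    cs.foldl pvAStep (o, 4) = (o ++ cs, 4) := by
  induction cs generalizing o with
  | nil => simp
  | cons c cs ih => simp [pvAStep, ih]

theorem pvA_state3 (cs : List Char) (o : List Char) :
    (cs.foldl pvAStep (o, 3)).1 = o ++ (pvBDrop true cs).drop 1 := by
  induction cs generalizing o with
  | nil => simp [pvBDrop]
  | cons c cs ih =>
    by_cases h : PySem.Chars.isdigit c = true
    · simp [pvAStep, h, pvBDrop, ih]
    · simp [pvAStep, h, pvBDrop, pvA_state4]

theorem pvA_state2 (cs : List Char) (o : List Char) :
    (cs.foldl pvAStep (o, 2)).1 = o ++ (pvBDrop true (pvBDrop false cs)).drop 1 := by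
  induction cs generalizing o with
  | nil => simp [pvBDrop]
  | cons c cs ih =>
    by_cases h : PySem.Chars.isdigit c = true
    · simp [pvAStep, h, pvBDrop, pvA_state3]
    · simp [pvAStep, h, pvBDrop, ih]

theorem pvA_state1 (cs : List Char) (o : List Char) :
    (cs.foldl pvAStep (o, 1)).1
      = o ++ (pvBDrop true (pvBDrop false (pvBDrop true cs))).drop 1 := by
  induction cs generalizing o with
  | nil => simp [pvBDrop]
  | cons c cs ih =>
    by_cases h : PySem.Chars.isdigit c = true
    · simp [pvAStep, h, pvBDrop, ih]
    · simp [pvAStep, h, pvBDrop, pvA_state2]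

theorem pvA_state0 (cs : List Char) (o : List Char) :
    (cs.foldl pvAStep (o, 0)).1
      = o ++ (pvBDrop true (pvBDrop false (pvBDrop true (pvBDrop false cs)))).drop 1 := by
  induction cs generalizing o with
  | nil => simp [pvBDrop]
  | cons c cs ih =>
    by_cases h : PySem.Chars.isdigit c = true
    · simp [pvAStep, h, pvBDrop, pvA_state1]
    · simp [pvAStep, h, pvBDrop, ih]

theorem pvBSkip_drop (cs : List Char) (w : Bool) (i : Nat) :
    cs.drop (pvBSkip cs w i) = pvBDrop w (cs.drop i) := by
  fun_induction pvBSkip cs w i with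
  | case1 i h hd ih =>
    rw [ih]
    rw [List.drop_eq_getElem_cons h]
    simp [pvBDrop, hd]
  | case2 i h hd =>
    rw [List.drop_eq_getElem_cons h]
    simp [pvBDrop, hd]
  | case3 i h =>
    have : cs.drop i = [] := List.drop_eq_nil_of_le (by omega)
    simp [this, pvBDrop]

-- ===== VERDICT (by name: the statement is the Claim_ definition above) =====
theorem get_process_text_after_indices_spec : Claim_equal_get_process_text_after_indices := by
  intro text _
  unfold Spec_get_process_text_after_indices get_process_text_after_indices get_process_text_after_indices_alt
  simp only [List.foldl, pvA_state0, List.nil_append]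
  have h : (text.toList.drop
      (pvBSkip text.toList true
        (pvBSkip text.toList false (pvBSkip text.toList true (pvBSkip text.toList false 0))) + 1))
      = (pvBDrop true (pvBDrop false (pvBDrop true (pvBDrop false text.toList)))).drop 1 := by
    rw [← List.drop_drop, pvBSkip_drop, pvBSkip_drop, pvBSkip_drop, pvBSkip_drop,
      List.drop_zero]
  rw [h]
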